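-- pv_equiv track=rewrite | github.com/FX-PBS/dds-extractor | ddsx.py | _calc_cubemap_tex_count
-- ===== SOURCE A (Python) =====
-- def _calc_cubemap_tex_count(cubemap_value):
--     if cubemap_value == 0:
--         return 0
--
--     flag = 128
--     count = 0
--     while cubemap_value != 0 or flag >= 1:
--         if cubemap_value - flag >= 0:
--             cubemap_value -= flag
--             count += 1
--
--         flag //= 2
--
--     if count > 0:
--         count -= 1
--
--     return count
-- ===== SOURCE B (Python) =====
-- def _calc_cubemap_tex_count(cubemap_value):
--     if cubemap_value == 0:
--         return 0
--     return cubemap_value.bit_count() - 1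
-- ===== Notes on version B (the rewrite author's own statement) =====
-- stated objective: simpler
-- what changed: Replaces the greedy subtract-powers-of-two loop with flag/count bookkeeping by a guard plus a single popcount (int.bit_count) minus one; Pre_ admits 0..255, outside which A's loop never terminates.
import Mathlib
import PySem

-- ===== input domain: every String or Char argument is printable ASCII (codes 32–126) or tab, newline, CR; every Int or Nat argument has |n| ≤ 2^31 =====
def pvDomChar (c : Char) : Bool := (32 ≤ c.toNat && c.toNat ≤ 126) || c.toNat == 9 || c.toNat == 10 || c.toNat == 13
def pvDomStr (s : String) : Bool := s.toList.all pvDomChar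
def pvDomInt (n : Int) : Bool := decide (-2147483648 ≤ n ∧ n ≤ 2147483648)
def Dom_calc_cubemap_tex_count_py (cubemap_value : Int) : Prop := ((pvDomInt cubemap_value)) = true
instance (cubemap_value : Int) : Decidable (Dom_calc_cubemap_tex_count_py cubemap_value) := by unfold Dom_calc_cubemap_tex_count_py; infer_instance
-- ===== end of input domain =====

-- B replaces A's greedy subtract-powers-of-two loop by a guard plus popcount minus one (simpler).

-- ===== PORT A =====
-- A's while loop, fuel-bounded: on every input admitted by Pre_ (0..255) the loop runs
-- exactly 8 iterations (flag 128 → 0) and then exits, so fuel 9 is never exhausted there;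
-- outside Pre_ the Python loop never terminates and nothing is claimed.
def calcLoopA : Nat → Int → Int → Int → Int
  | 0, _, _, count => count
  | fuel + 1, v, flag, count =>
    if v ≠ 0 ∨ flag ≥ 1 then
      if v - flag ≥ 0 then
        calcLoopA fuel (v - flag) (PySem.Int.floordiv flag 2) (count + 1)
      else
        calcLoopA fuel v (PySem.Int.floordiv flag 2) count
    else count

def calc_cubemap_tex_count_py (cubemap_value : Int) : Int :=
  if cubemap_value = 0 then 0
  else
    let count := calcLoopA 9 cubemap_value 128 0
    if count > 0 then count - 1 else count

-- ===== PORT B =====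
-- popcount = Python's int.bit_count (binary digit sum of a nonnegative integer)
-- structural on a fuel bound (n itself, since n/2 < n), so the kernel can evaluate it
def pyBitCountGo : Nat → Nat → Nat
  | _, 0 => 0
  | 0, _ + 1 => 0   -- unreachable: fuel n always suffices
  | fuel + 1, m + 1 => pyBitCountGo fuel ((m + 1) / 2) + (m + 1) % 2

def pyBitCount (n : Nat) : Nat := pyBitCountGo n n

def calc_cubemap_tex_count_py_alt (cubemap_value : Int) : Int :=
  if cubemap_value = 0 then 0
  else (pyBitCount cubemap_value.toNat : Int) - 1

-- ===== PRECONDITION & SPEC =====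
-- A's while loop never terminates for negative inputs or inputs above 255 (the flag is
-- exhausted while a nonzero remainder is left), so Pre_ admits exactly 0..255.
def Pre_calc_cubemap_tex_count_py (cubemap_value : Int) : Prop :=
  0 ≤ cubemap_value ∧ cubemap_value ≤ 255
instance (cubemap_value : Int) : Decidable (Pre_calc_cubemap_tex_count_py cubemap_value) := by
  unfold Pre_calc_cubemap_tex_count_py; infer_instance

def pvWitness_calc_cubemap_tex_count_py : Int := 42

def Spec_calc_cubemap_tex_count_py (cubemap_value : Int) (out : Int) : Prop :=
  out = calc_cubemap_tex_count_py_alt cubemap_value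
instance (cubemap_value : Int) (out : Int) : Decidable (Spec_calc_cubemap_tex_count_py cubemap_value out) := by
  unfold Spec_calc_cubemap_tex_count_py; infer_instance

-- ===== CLAIM (what is proved, stated in full; the proofs are below) =====
def Claim_equal_calc_cubemap_tex_count_py : Prop := ∀ (cubemap_value : Int), Dom_calc_cubemap_tex_count_py cubemap_value → Pre_calc_cubemap_tex_count_py cubemap_value → Spec_calc_cubemap_tex_count_py cubemap_value (calc_cubemap_tex_count_py cubemap_value)

-- ===== LEMMAS AND PROOFS =====
-- Exhaustive check over the 256 admitted inputs, via their Nat representatives.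
set_option maxRecDepth 4000 in
theorem calc_agree_nat : ∀ n : Nat, n < 256 →
    calc_cubemap_tex_count_py (n : Int) = calc_cubemap_tex_count_py_alt (n : Int) := by decide

-- ===== VERDICT (by name: the statement is the Claim_ definition above) =====
theorem calc_cubemap_tex_count_py_spec : Claim_equal_calc_cubemap_tex_count_py := by
  intro v _ hpre
  unfold Spec_calc_cubemap_tex_count_py
  have hv : ((v.toNat : Int)) = v := Int.toNat_of_nonneg hpre.1
  have hlt : v.toNat < 256 := by
    have := hpre.1; have := hpre.2; omega
  have := calc_agree_nat v.toNat hlt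
  rwa [hv] at this
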